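-- pv_equiv track=rewrite | github.com/jorisvr/python-qrdecode | qrdecode.py | get_bits_from_stream
-- ===== SOURCE A (Python) =====
-- class QRDecodeError(Exception):
--     """Raised when QR decoding fails."""
--     pass
--
-- def get_bits_from_stream(bitstream, position, num_bits):
--     """Read bits from the bitstream.
--
--     Parameters:
--         bitstream (ndarray):    Array of 8-bit data codewords.
--         position (int):         Index of first bit to read.
--         num_bits (int):         Number of bits to read.
--
--     Returns:
--         Integer representing the obtained bits (most-significant bit first).
--
--     Raises:
--         QRDecodeError: If the requested range exceeds the bitstream length.
--     """
--
--     if position + num_bits > 8 * len(bitstream):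
--         raise QRDecodeError("Unexpected end of bitstream")
--
--     word_pos = position // 8
--     bit_pos = position % 8
--
--     k = min(num_bits, 8 - bit_pos)
--     mask = (1 << k) - 1
--     value = (int(bitstream[word_pos]) >> (8 - bit_pos - k)) & mask
--
--     bits_remaining = num_bits - k
--
--     while bits_remaining >= 8:
--         word_pos += 1
--         word = int(bitstream[word_pos])
--         value = (value << 8) | word
--         bits_remaining -= 8
--
--     if bits_remaining > 0:
--         word_pos += 1
--         mask = (1 << bits_remaining) - 1
--         lsb = 8 - bits_remaining
--         word = (int(bitstream[word_pos]) >> (8 - bits_remaining)) & mask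
--         value = (value << bits_remaining) | word
--
--     return value
-- ===== SOURCE B (Python) =====
-- class QRDecodeError(Exception):
--     """Raised when QR decoding fails."""
--     pass
--
-- def get_bits_from_stream(bitstream, position, num_bits):
--     """Read num_bits bits from the bitstream starting at position, MSB first.
--
--     Builds the result back-to-front: take the partial tail byte first, then
--     OR in the whole middle bytes walking backwards, finally the head chunk,
--     instead of A's left-to-right shift-accumulate over three phases.
--     """
--     if position + num_bits > 8 * len(bitstream):
--         raise QRDecodeError("Unexpected end of bitstream")
--
--     word_pos = position // 8
--     bit_pos = position % 8
--
--     k = min(num_bits, 8 - bit_pos)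
--     head = (int(bitstream[word_pos]) >> (8 - bit_pos - k)) & ((1 << k) - 1)
--
--     rem = num_bits - k
--     m = rem // 8
--     r = rem % 8
--
--     if r > 0:
--         value = (int(bitstream[word_pos + m + 1]) >> (8 - r)) & ((1 << r) - 1)
--         shift = r
--     else:
--         value = 0
--         shift = 0
--
--     for j in range(word_pos + m, word_pos, -1):
--         value |= int(bitstream[j]) << shift
--         shift += 8
--
--     return value | (head << shift)
-- ===== Notes on version B (the rewrite author's own statement) =====
-- stated objective: alternative
-- what changed: B assembles the result back-to-front by OR-ing shifted chunks (partial tail byte first, whole middle bytes walking backwards with a growing shift, head chunk last) instead of A's left-to-right shift-and-accumulate over a partial head byte, a forward whole-byte loop and a partial tail byte.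
import Mathlib
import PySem

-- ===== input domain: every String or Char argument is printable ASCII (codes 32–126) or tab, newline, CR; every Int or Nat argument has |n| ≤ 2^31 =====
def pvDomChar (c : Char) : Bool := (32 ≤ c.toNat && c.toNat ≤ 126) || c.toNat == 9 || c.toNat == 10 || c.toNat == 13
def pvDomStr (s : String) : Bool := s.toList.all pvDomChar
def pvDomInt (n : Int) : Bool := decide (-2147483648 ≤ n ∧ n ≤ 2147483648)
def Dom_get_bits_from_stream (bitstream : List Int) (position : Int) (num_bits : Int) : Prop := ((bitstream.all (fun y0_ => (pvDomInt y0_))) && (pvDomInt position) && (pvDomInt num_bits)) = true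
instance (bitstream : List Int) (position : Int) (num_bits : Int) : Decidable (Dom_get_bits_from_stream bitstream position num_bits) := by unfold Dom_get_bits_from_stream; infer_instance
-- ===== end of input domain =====

-- B builds the value back-to-front (tail chunk first, then the middle bytes walking backwards,
-- the head chunk last, OR-ing shifted chunks) instead of A's left-to-right shift-accumulate.

-- ===== PORT A =====
-- A's `while bits_remaining >= 8` loop over (value, word_pos, bits_remaining)
def pvALoop (b : List Int) (value wordPos rem : Int) : Int × Int × Int :=
  if h : 8 ≤ rem then
    pvALoop b (PySem.Int.bor (value <<< (8 : Nat)) ((PySem.List.pyGet? b (wordPos + 1)).getD 0))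
      (wordPos + 1) (rem - 8)
  else (value, wordPos, rem)
termination_by rem.toNat
decreasing_by omega

def get_bits_from_stream (bitstream : List Int) (position : Int) (num_bits : Int) : Int :=
  let word_pos := PySem.Int.floordiv position 8
  let bit_pos := PySem.Int.mod position 8
  let k := min num_bits (8 - bit_pos)
  let mask := (1 : Int) <<< k.toNat - 1
  let value := PySem.Int.band (((PySem.List.pyGet? bitstream word_pos).getD 0) >>> (8 - bit_pos - k).toNat) mask
  let res := pvALoop bitstream value word_pos (num_bits - k)
  if res.2.2 > 0 then
    let mask2 := (1 : Int) <<< res.2.2.toNat - 1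
    let word := PySem.Int.band (((PySem.List.pyGet? bitstream (res.2.1 + 1)).getD 0) >>> (8 - res.2.2).toNat) mask2
    PySem.Int.bor (res.1 <<< res.2.2.toNat) word
  else res.1

-- ===== PORT B =====
-- B's `for j in range(word_pos + m, word_pos, -1)` loop over (value, shift); j = wordPos + cnt
def pvBLoop (b : List Int) (wordPos cnt value shift : Int) : Int × Int :=
  if h : 0 < cnt then
    pvBLoop b wordPos (cnt - 1)
      (PySem.Int.bor value (((PySem.List.pyGet? b (wordPos + cnt)).getD 0) <<< shift.toNat))
      (shift + 8)
  else (value, shift)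
termination_by cnt.toNat
decreasing_by omega

def get_bits_from_stream_alt (bitstream : List Int) (position : Int) (num_bits : Int) : Int :=
  let word_pos := PySem.Int.floordiv position 8
  let bit_pos := PySem.Int.mod position 8
  let k := min num_bits (8 - bit_pos)
  let head := PySem.Int.band (((PySem.List.pyGet? bitstream word_pos).getD 0) >>> (8 - bit_pos - k).toNat) ((1 : Int) <<< k.toNat - 1)
  let rem := num_bits - k
  let m := PySem.Int.floordiv rem 8
  let r := PySem.Int.mod rem 8
  let vs :=
    if r > 0 then
      (PySem.Int.band (((PySem.List.pyGet? bitstream (word_pos + m + 1)).getD 0) >>> (8 - r).toNat) ((1 : Int) <<< r.toNat - 1), r)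
    else ((0 : Int), (0 : Int))
  let res := pvBLoop bitstream word_pos m vs.1 vs.2
  PySem.Int.bor res.1 (head <<< res.2.toNat)

-- ===== PRECONDITION & SPEC =====
-- Pre_ is exactly where the Python A returns: outside it A raises QRDecodeError (range overrun),
-- ValueError (negative shift amount when num_bits < 0) or IndexError (word index out of range).
def Pre_get_bits_from_stream (bitstream : List Int) (position : Int) (num_bits : Int) : Prop :=
  0 ≤ num_bits ∧ -8 * (bitstream.length : Int) ≤ position ∧
    position < 8 * (bitstream.length : Int) ∧ position + num_bits ≤ 8 * (bitstream.length : Int)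
instance (bitstream : List Int) (position : Int) (num_bits : Int) : Decidable (Pre_get_bits_from_stream bitstream position num_bits) := by unfold Pre_get_bits_from_stream; infer_instance

def pvWitness_get_bits_from_stream : List Int × Int × Int := ([5, 170], 3, 9)

def Spec_get_bits_from_stream (bitstream : List Int) (position : Int) (num_bits : Int) (out : Int) : Prop := out = get_bits_from_stream_alt bitstream position num_bits
instance (bitstream : List Int) (position : Int) (num_bits : Int) (out : Int) : Decidable (Spec_get_bits_from_stream bitstream position num_bits out) := by unfold Spec_get_bits_from_stream; infer_instance

-- ===== CLAIM (what is proved, stated in full; the proofs are below) =====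
def Claim_equal_get_bits_from_stream : Prop := ∀ (bitstream : List Int) (position : Int) (num_bits : Int), Dom_get_bits_from_stream bitstream position num_bits → Pre_get_bits_from_stream bitstream position num_bits → Spec_get_bits_from_stream bitstream position num_bits (get_bits_from_stream bitstream position num_bits)

-- ===== LEMMAS AND PROOFS =====

-- Two's-complement bit function on Int, and the bitwise algebra the reassociation proof needs.
def pvBit (a : Int) (k : Nat) : Bool :=
  if 0 ≤ a then a.toNat.testBit k else !((-a - 1).toNat.testBit k)

lemma pv_and_self_add_xor (u v : Nat) (h : u &&& v = v) : v + (u ^^^ v) = u := by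
  induction u using Nat.strong_induction_on generalizing v with
  | _ u ih =>
    rcases Nat.eq_zero_or_pos u with h0 | h0
    · subst h0
      have : v = 0 := by simpa using h.symm
      simp [this]
    · have h2 : u / 2 &&& v / 2 = v / 2 := by rw [← Nat.and_div_two, h]
      have ihe := ih (u / 2) (by omega) (v / 2) h2
      have hx : (u ^^^ v) / 2 = u / 2 ^^^ v / 2 := Nat.xor_div_two
      have hpar : (u ^^^ v) % 2 = (u + v) % 2 := Nat.xor_mod_two_eq
      have hvp : v % 2 ≤ u % 2 := by
        rcases Nat.mod_two_eq_zero_or_one v with hv | hv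
        · omega
        · by_contra hu
          have hu0 : u % 2 = 0 := by omega
          have hb := congrArg (fun t => t.testBit 0) h
          simp [Nat.testBit_zero, hu0, hv] at hb
      omega

lemma pv_sub_and_testBit (x y k : Nat) :
    (x - (x &&& y)).testBit k = (x.testBit k && !(y.testBit k)) := by
  have hsub : x - (x &&& y) = x ^^^ (x &&& y) := by
    have h1 : x &&& (x &&& y) = x &&& y := by
      apply Nat.eq_of_testBit_eq
      intro i
      simp only [Nat.testBit_and]
      cases x.testBit i <;> cases y.testBit i <;> rfl
    have := pv_and_self_add_xor x (x &&& y) h1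
    omega
  rw [hsub, Nat.testBit_xor, Nat.testBit_and]
  cases x.testBit k <;> cases y.testBit k <;> rfl

lemma pvBit_ext {a b : Int} (h : ∀ k, pvBit a k = pvBit b k) : a = b := by
  have hb2 : ∀ (u v : Nat), u.testBit (u + v) = false := fun u v =>
    Nat.testBit_lt_two_pow (lt_of_lt_of_le Nat.lt_two_pow_self
      (Nat.pow_le_pow_right (by norm_num) (Nat.le_add_right _ _)))
  by_cases ha : 0 ≤ a <;> by_cases hb : 0 ≤ b
  · have : a.toNat = b.toNat := by
      apply Nat.eq_of_testBit_eq
      intro i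
      have hi := h i
      rw [pvBit, pvBit, if_pos ha, if_pos hb] at hi
      exact hi
    omega
  · exfalso
    have hk := h (a.toNat + (-b - 1).toNat)
    rw [pvBit, pvBit, if_pos ha, if_neg hb, hb2] at hk
    rw [Nat.add_comm, hb2] at hk
    simp at hk
  · exfalso
    have hk := h (b.toNat + (-a - 1).toNat)
    rw [pvBit, pvBit, if_pos hb, if_neg ha] at hk
    rw [hb2, Nat.add_comm, hb2] at hk
    simp at hk
  · have : (-a - 1).toNat = (-b - 1).toNat := by
      apply Nat.eq_of_testBit_eq
      intro i
      have hi := h i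
      rw [pvBit, pvBit, if_neg ha, if_neg hb] at hi
      exact Bool.not_inj hi
    omega

lemma pvBit_bor (a b : Int) (k : Nat) :
    pvBit (PySem.Int.bor a b) k = (pvBit a k || pvBit b k) := by
  by_cases ha : 0 ≤ a <;> by_cases hb : 0 ≤ b
  · rw [PySem.Int.bor_of_nonneg ha hb]
    simp [pvBit, ha, hb, Nat.testBit_or]
  · rw [PySem.Int.bor, if_pos ha, if_neg hb]
    simp only [pvBit, if_pos ha, if_neg (by omega : ¬ (0:Int) ≤ -(((-b - 1).toNat - ((-b - 1).toNat &&& a.toNat) : Nat) : Int) - 1), if_neg hb]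
    have htn : (-(-(((-b - 1).toNat - ((-b - 1).toNat &&& a.toNat) : Nat) : Int) - 1) - 1).toNat
        = (-b - 1).toNat - ((-b - 1).toNat &&& a.toNat) := by omega
    rw [htn, pv_sub_and_testBit]
    cases h1 : a.toNat.testBit k <;> cases h2 : (-b - 1).toNat.testBit k <;> rfl
  · rw [PySem.Int.bor, if_neg ha, if_pos hb]
    simp only [pvBit, if_neg (by omega : ¬ (0:Int) ≤ -(((-a - 1).toNat - ((-a - 1).toNat &&& b.toNat) : Nat) : Int) - 1), if_neg ha, if_pos hb]
    have htn : (-(-(((-a - 1).toNat - ((-a - 1).toNat &&& b.toNat) : Nat) : Int) - 1) - 1).toNat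
        = (-a - 1).toNat - ((-a - 1).toNat &&& b.toNat) := by omega
    rw [htn, pv_sub_and_testBit]
    cases h1 : b.toNat.testBit k <;> cases h2 : (-a - 1).toNat.testBit k <;> rfl
  · rw [PySem.Int.bor, if_neg ha, if_neg hb]
    simp only [pvBit, if_neg (by omega : ¬ (0:Int) ≤ -((((-a - 1).toNat &&& (-b - 1).toNat : Nat)) : Int) - 1), if_neg ha, if_neg hb]
    have htn : (-(-((((-a - 1).toNat &&& (-b - 1).toNat : Nat)) : Int) - 1) - 1).toNat
        = (-a - 1).toNat &&& (-b - 1).toNat := by omega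
    rw [htn, Nat.testBit_and]
    cases h1 : (-a - 1).toNat.testBit k <;> cases h2 : (-b - 1).toNat.testBit k <;> rfl

lemma pv_testBit_mul_pow_add (a b i j : Nat) (h : b < 2 ^ i) :
    (a * 2 ^ i + b).testBit j = if j < i then b.testBit j else a.testBit (j - i) := by
  split
  · next hj =>
    have hmod : (a * 2 ^ i + b) % 2 ^ i = b := by
      rw [Nat.add_mod, Nat.mul_mod_left]
      simp [Nat.mod_eq_of_lt h]
    have hx := Nat.testBit_mod_two_pow (a * 2 ^ i + b) i j
    rw [hmod] at hx
    simp [hj] at hx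
    exact hx.symm
  · next hj =>
    have hdiv : (a * 2 ^ i + b) / 2 ^ i = a := by
      rw [Nat.mul_comm a (2 ^ i), Nat.mul_add_div (Nat.two_pow_pos i), Nat.div_eq_of_lt h]
      omega
    have hx := Nat.testBit_div_two_pow (n := i) (a * 2 ^ i + b) (j - i)
    rw [hdiv, Nat.sub_add_cancel (by omega)] at hx
    exact hx.symm

lemma pvBit_shiftLeft (a : Int) (n k : Nat) :
    pvBit (a <<< n) k = if k < n then false else pvBit a (k - n) := by
  rw [Int.shiftLeft_eq]
  by_cases ha : 0 ≤ a
  · have hnn : 0 ≤ a * 2 ^ n := by positivity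
    have htn : (a * 2 ^ n).toNat = a.toNat * 2 ^ n := by
      obtain ⟨m, hm⟩ := Int.le.dest ha
      have ha' : a = (m : Int) := by omega
      subst ha'
      have hcast : ((m : Int) * 2 ^ n) = ((m * 2 ^ n : Nat) : Int) := by push_cast; ring
      rw [hcast, Int.toNat_natCast, Int.toNat_natCast]
    simp only [pvBit, if_pos ha, if_pos hnn, htn, ← Nat.shiftLeft_eq, Nat.testBit_shiftLeft]
    by_cases hk : k < n
    · simp [hk, show ¬ (k ≥ n) by omega]
    · simp [hk, show k ≥ n by omega]
  · have hneg : a * 2 ^ n < 0 := by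
      have ha0 : a < 0 := by omega
      have h2 : (0:Int) < 2 ^ n := by positivity
      exact mul_neg_of_neg_of_pos ha0 h2
    have hcnn : (0:Int) ≤ -a - 1 := by omega
    obtain ⟨c, hc⟩ := Int.le.dest hcnn
    have hc' : -a - 1 = (c : Int) := by omega
    have h2n : (1:Nat) ≤ 2 ^ n := Nat.one_le_two_pow
    have htn : (-(a * 2 ^ n) - 1).toNat = c * 2 ^ n + (2 ^ n - 1) := by
      have hcast : -(a * 2 ^ n) - 1 = ((c * 2 ^ n + (2 ^ n - 1) : Nat) : Int) := by
        push_cast [h2n]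
        have hx : a = -(c : Int) - 1 := by omega
        rw [hx]; ring
      rw [hcast, Int.toNat_natCast]
    simp only [pvBit, if_neg (by omega : ¬ (0:Int) ≤ a * 2 ^ n), if_neg ha, htn]
    rw [pv_testBit_mul_pow_add _ _ _ _ (by omega)]
    split
    · next hk => simp [Nat.testBit_two_pow_sub_one, hk]
    · next hk =>
      have : (-a - 1).toNat = c := by omega
      rw [this]

lemma pv_bor_assoc (a b c : Int) :
    PySem.Int.bor (PySem.Int.bor a b) c = PySem.Int.bor a (PySem.Int.bor b c) := by
  apply pvBit_ext
  intro k
  simp [pvBit_bor, Bool.or_assoc]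

lemma pv_zero_bor (a : Int) : PySem.Int.bor 0 a = a := by
  rw [PySem.Int.bor_comm, PySem.Int.bor_zero]

lemma pv_bor_rot (x y z : Int) :
    PySem.Int.bor (PySem.Int.bor x y) z = PySem.Int.bor (PySem.Int.bor z y) x := by
  apply pvBit_ext
  intro k
  simp only [pvBit_bor]
  cases pvBit x k <;> cases pvBit y k <;> cases pvBit z k <;> rfl

lemma pv_shiftLeft_bor (a b : Int) (n : Nat) :
    (PySem.Int.bor a b) <<< n = PySem.Int.bor (a <<< n) (b <<< n) := by
  apply pvBit_ext
  intro k
  rw [pvBit_bor, pvBit_shiftLeft, pvBit_shiftLeft, pvBit_shiftLeft, pvBit_bor]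
  split <;> simp

lemma pv_shiftLeft_shiftLeft (a : Int) (m n : Nat) :
    (a <<< m) <<< n = a <<< (m + n) := by
  rw [Int.shiftLeft_eq, Int.shiftLeft_eq, Int.shiftLeft_eq, pow_add]
  ring

-- OR of the cnt whole middle bytes b[wp+1..wp+cnt], first byte highest, lowest byte at shift sh
def pvOrWords : List Int → Int → Nat → Nat → Int
  | _, _, 0, _ => 0
  | b, wp, cnt + 1, sh =>
      PySem.Int.bor (((PySem.List.pyGet? b (wp + 1)).getD 0) <<< (sh + 8 * cnt))
        (pvOrWords b (wp + 1) cnt sh)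

lemma pvOrWords_succ (b : List Int) (wp : Int) (cnt sh : Nat) :
    pvOrWords b wp (cnt + 1) sh
      = PySem.Int.bor (((PySem.List.pyGet? b (wp + 1)).getD 0) <<< (sh + 8 * cnt))
          (pvOrWords b (wp + 1) cnt sh) := rfl

lemma pvALoop_char (b : List Int) (cnt : Nat) :
    ∀ (v wp s : Int), 0 ≤ s → s < 8 →
      pvALoop b v wp (8 * (cnt : Int) + s) =
        (PySem.Int.bor (v <<< (8 * cnt)) (pvOrWords b wp cnt 0), wp + (cnt : Int), s) := by
  induction cnt with
  | zero =>
    intro v wp s h0 h8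
    rw [pvALoop, dif_neg (by omega)]
    simp [pvOrWords, PySem.Int.bor_zero]
  | succ cnt ih =>
    intro v wp s h0 h8
    rw [pvALoop, dif_pos (by push_cast; omega)]
    have harg : 8 * ((cnt + 1 : Nat) : Int) + s - 8 = 8 * (cnt : Int) + s := by push_cast; ring
    rw [harg, ih _ _ _ h0 h8]
    have hv : (PySem.Int.bor (v <<< (8:Nat)) ((PySem.List.pyGet? b (wp + 1)).getD 0)) <<< (8 * cnt)
        = PySem.Int.bor (v <<< (8 * (cnt + 1))) (((PySem.List.pyGet? b (wp + 1)).getD 0) <<< (0 + 8 * cnt)) := by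
      rw [pv_shiftLeft_bor, pv_shiftLeft_shiftLeft]
      congr 2 <;> omega
    rw [hv, pv_bor_assoc, ← pvOrWords_succ]
    refine Prod.ext rfl (Prod.ext ?_ rfl)
    push_cast
    show wp + 1 + (cnt : Int) = wp + ((cnt : Int) + 1)
    ring

lemma pvOrWords_snoc (b : List Int) (cnt : Nat) :
    ∀ (wp : Int) (sh : Nat),
      pvOrWords b wp (cnt + 1) sh =
        PySem.Int.bor (pvOrWords b wp cnt (sh + 8))
          (((PySem.List.pyGet? b (wp + (cnt : Int) + 1)).getD 0) <<< sh) := by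
  induction cnt with
  | zero =>
    intro wp sh
    simp [pvOrWords, pv_zero_bor, PySem.Int.bor_comm]
  | succ cnt ih =>
    intro wp sh
    rw [pvOrWords_succ, ih (wp + 1) sh, ← pv_bor_assoc, pvOrWords_succ]
    have he : sh + 8 * (cnt + 1) = sh + 8 + 8 * cnt := by ring
    have hidx : wp + 1 + (cnt : Int) + 1 = wp + ((cnt : Nat) + 1 : Nat) + 1 := by push_cast; ring
    rw [he, hidx]

lemma pvBLoop_char (b : List Int) (cnt : Nat) :
    ∀ (t wp sh : Int), 0 ≤ sh →
      pvBLoop b wp (cnt : Int) t sh =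
        (PySem.Int.bor t (pvOrWords b wp cnt sh.toNat), sh + 8 * (cnt : Int)) := by
  induction cnt with
  | zero =>
    intro t wp sh hsh
    rw [pvBLoop, dif_neg (by omega)]
    simp [pvOrWords, PySem.Int.bor_zero]
  | succ cnt ih =>
    intro t wp sh hsh
    rw [pvBLoop, dif_pos (by push_cast; omega)]
    have h1 : ((cnt + 1 : Nat) : Int) - 1 = (cnt : Int) := by push_cast; ring
    rw [h1, ih _ _ _ (by omega)]
    have h2 : (sh + 8).toNat = sh.toNat + 8 := by omega
    rw [h2, pvOrWords_snoc b cnt wp sh.toNat]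
    have hidx : wp + ((cnt + 1 : Nat) : Int) = wp + (cnt : Int) + 1 := by push_cast; ring
    rw [hidx]
    refine Prod.ext ?_ ?_
    · show PySem.Int.bor (PySem.Int.bor t _) _ = PySem.Int.bor t (PySem.Int.bor _ _)
      rw [pv_bor_assoc]
      rw [PySem.Int.bor_comm (((PySem.List.pyGet? b (wp + (cnt : Int) + 1)).getD 0) <<< sh.toNat) (pvOrWords b wp cnt (sh.toNat + 8))]
    · show sh + 8 + 8 * (cnt : Int) = sh + 8 * ((cnt + 1 : Nat) : Int)
      push_cast
      ring

lemma pvOrWords_shift (b : List Int) (cnt : Nat) :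
    ∀ (wp : Int) (sh : Nat),
      pvOrWords b wp cnt sh = (pvOrWords b wp cnt 0) <<< sh := by
  induction cnt with
  | zero =>
    intro wp sh
    simp [pvOrWords, Int.zero_shiftLeft]
  | succ cnt ih =>
    intro wp sh
    rw [pvOrWords_succ, pvOrWords_succ, ih, pv_shiftLeft_bor, pv_shiftLeft_shiftLeft]
    have he : 0 + 8 * cnt + sh = sh + 8 * cnt := by ring
    rw [he]

lemma pv_main (b : List Int) (p n : Int) :
    get_bits_from_stream b p n = get_bits_from_stream_alt b p n := by
  simp only [get_bits_from_stream, get_bits_from_stream_alt]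
  set wp := PySem.Int.floordiv p 8 with hwp
  set bp := PySem.Int.mod p 8 with hbp
  set k := min n (8 - bp) with hk
  set head := PySem.Int.band (((PySem.List.pyGet? b wp).getD 0) >>> (8 - bp - k).toNat) ((1 : Int) <<< k.toNat - 1) with hhead
  set rem := n - k with hrem
  set m := PySem.Int.floordiv rem 8 with hm
  set r := PySem.Int.mod rem 8 with hr
  have hr0 : 0 ≤ r := PySem.Int.mod_nonneg rem (by norm_num)
  have hr8 : r < 8 := PySem.Int.mod_lt rem (by norm_num)
  have hrem0 : 0 ≤ rem := by
    have := min_le_left n (8 - bp)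
    omega
  have hmr : m * 8 + r = rem := PySem.Int.floordiv_mul_add_mod rem 8
  have hm0 : 0 ≤ m := by omega
  set cnt := m.toNat with hcnt
  have hcm : (cnt : Int) = m := Int.toNat_of_nonneg hm0
  have harg : rem = 8 * (cnt : Int) + r := by omega
  rw [harg, pvALoop_char b cnt head wp r hr0 hr8, ← hcm]
  dsimp only
  by_cases hrpos : r > 0
  · rw [if_pos hrpos, if_pos hrpos]
    rw [pvBLoop_char b cnt
      (PySem.Int.band (((PySem.List.pyGet? b (wp + (cnt : Int) + 1)).getD 0) >>> (8 - r).toNat) ((1 : Int) <<< r.toNat - 1))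
      wp r hr0]
    dsimp only
    rw [pvOrWords_shift b cnt wp r.toNat, pv_shiftLeft_bor, pv_shiftLeft_shiftLeft]
    have hsh : (r + 8 * (cnt : Int)).toNat = 8 * cnt + r.toNat := by omega
    rw [hsh]
    exact pv_bor_rot _ _ _
  · rw [if_neg hrpos, if_neg hrpos]
    rw [pvBLoop_char b cnt 0 wp 0 le_rfl]
    dsimp only
    rw [pv_zero_bor]
    have hsh : ((0:Int) + 8 * (cnt : Int)).toNat = 8 * cnt := by omega
    rw [hsh]
    simp only [Int.toNat_zero]
    rw [PySem.Int.bor_comm]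

-- ===== VERDICT (by name: the statement is the Claim_ definition above) =====
theorem get_bits_from_stream_spec : Claim_equal_get_bits_from_stream := by
  intro b p n _ _
  unfold Spec_get_bits_from_stream
  exact pv_main b p n
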